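-- pv_equiv track=rewrite | github.com/ptbarros/dollar-bill-processor | pattern_engine_v2.py | _check_consecutive_triples
-- ===== SOURCE A (Python) =====
-- def _check_consecutive_triples(digits: str) -> bool:
--     """Two triples back-to-back."""
--     if len(digits) != 8:
--         return False
--     for i in range(3):
--         if (digits[i] == digits[i+1] == digits[i+2] and
--             digits[i+3] == digits[i+4] == digits[i+5] and
--             digits[i] != digits[i+3]):
--             return True
--     return False
-- ===== SOURCE B (Python) =====
-- def _check_consecutive_triples(digits: str) -> bool:
--     """Two triples back-to-back (run-length-encoding formulation)."""
--     if len(digits) != 8: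
--         return False
--     runs = []
--     for ch in digits:
--         if runs and runs[-1][0] == ch:
--             runs[-1][1] += 1
--         else:
--             runs.append([ch, 1])
--     return any(runs[j][1] >= 3 and runs[j + 1][1] >= 3 for j in range(len(runs) - 1))
-- ===== Notes on version B (the rewrite author's own statement) =====
-- stated objective: alternative
-- what changed: Replaced the fixed 3-window triple-equality scan with a run-length encoding pass that looks for two adjacent runs of length >= 3 (adjacent runs differ by construction, so no inequality check is needed).
import Mathlib
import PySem

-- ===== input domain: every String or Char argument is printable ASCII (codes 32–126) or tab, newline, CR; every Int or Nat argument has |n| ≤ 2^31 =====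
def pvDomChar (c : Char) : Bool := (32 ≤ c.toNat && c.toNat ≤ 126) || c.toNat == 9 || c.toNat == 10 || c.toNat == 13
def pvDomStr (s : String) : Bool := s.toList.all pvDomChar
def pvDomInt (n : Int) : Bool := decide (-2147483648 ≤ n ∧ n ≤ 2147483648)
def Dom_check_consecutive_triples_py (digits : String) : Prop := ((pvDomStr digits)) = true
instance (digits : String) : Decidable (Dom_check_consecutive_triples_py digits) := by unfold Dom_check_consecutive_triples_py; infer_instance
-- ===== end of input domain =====

-- B replaces A's fixed windowed triple scan by a run-length-encoding pass over the string
-- (alternative formulation; same cost on the fixed-size input).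

-- ===== PORT A =====
def check_consecutive_triples_py (digits : String) : Bool :=
  if PySem.Str.len digits ≠ 8 then false
  else (PySem.List.pyRange 0 3 1).any fun i =>
    (PySem.Str.pyGet? digits i == PySem.Str.pyGet? digits (i+1) &&
     PySem.Str.pyGet? digits (i+1) == PySem.Str.pyGet? digits (i+2)) &&
    (PySem.Str.pyGet? digits (i+3) == PySem.Str.pyGet? digits (i+4) &&
     PySem.Str.pyGet? digits (i+4) == PySem.Str.pyGet? digits (i+5)) &&
    (PySem.Str.pyGet? digits i != PySem.Str.pyGet? digits (i+3))

-- ===== PORT B =====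
-- one step of B's loop: extend the last run or open a new one (runs[-1][1] += 1 / runs.append)
def altPush (runs : List (Char × Int)) (ch : Char) : List (Char × Int) :=
  match runs.getLast? with
  | some (c, n) => if c == ch then runs.dropLast ++ [(c, n + 1)] else runs ++ [(ch, 1)]
  | none => [(ch, 1)]

def check_consecutive_triples_py_alt (digits : String) : Bool :=
  if PySem.Str.len digits ≠ 8 then false
  else
    let runs := digits.toList.foldl altPush []
    (List.range (runs.length - 1)).any fun j =>
      decide ((runs.getD j (' ', 0)).2 ≥ 3) && decide ((runs.getD (j+1) (' ', 0)).2 ≥ 3)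

-- ===== PRECONDITION & SPEC =====
def Spec_check_consecutive_triples_py (digits : String) (out : Bool) : Prop := out = check_consecutive_triples_py_alt digits
instance (digits : String) (out : Bool) : Decidable (Spec_check_consecutive_triples_py digits out) := by unfold Spec_check_consecutive_triples_py; infer_instance

-- ===== CLAIM (what is proved, stated in full; the proofs are below) =====
def Claim_equal_check_consecutive_triples_py : Prop := ∀ (digits : String), Dom_check_consecutive_triples_py digits → Spec_check_consecutive_triples_py digits (check_consecutive_triples_py digits)

-- ===== LEMMAS AND PROOFS =====

-- run-length encoding of c^n followed by t, written as structural recursion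
def rleAux (c : Char) (n : Int) : List Char → List (Char × Int)
  | [] => [(c, n)]
  | x :: t => if c == x then rleAux c (n + 1) t else (c, n) :: rleAux x 1 t

-- B's foldl computes rleAux
lemma foldl_altPush (t : List Char) : ∀ (acc : List (Char × Int)) (c : Char) (n : Int),
    t.foldl altPush (acc ++ [(c, n)]) = acc ++ rleAux c n t := by
  induction t with
  | nil => intro acc c n; simp [rleAux]
  | cons x t ih =>
      intro acc c n
      simp only [List.foldl_cons, altPush, List.getLast?_concat, rleAux]
      by_cases hx : c = x
      · simp only [hx, beq_self_eq_true, if_pos, List.dropLast_concat]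
        exact ih acc x (n + 1)
      · have hb : (c == x) = false := by simp [hx]
        simp only [hb, Bool.false_eq_true, if_neg, not_false_iff, List.append_assoc]
        have := ih (acc ++ [(c, n)]) x 1
        simpa using this

-- adjacent-equality pattern of c :: t
def pat (c : Char) : List Char → List Bool
  | [] => []
  | x :: t => (c == x) :: pat x t

-- run lengths determined by the pattern alone
def rlb (n : Int) : List Bool → List Int
  | [] => [n]
  | b :: t => if b then rlb (n + 1) t else n :: rlb 1 t

lemma map_snd_rleAux (t : List Char) : ∀ (c : Char) (n : Int),
    (rleAux c n t).map Prod.snd = rlb n (pat c t) := by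
  induction t with
  | nil => intro c n; simp [rleAux, pat, rlb]
  | cons x t ih =>
      intro c n
      by_cases hx : c = x
      · simp [rleAux, pat, rlb, hx, ih]
      · have hb : (c == x) = false := by simp [hx]
        simp [rleAux, pat, rlb, hb, ih]

-- B's adjacent-runs check reads only the run lengths
def bcheckI (ls : List Int) : Bool :=
  (List.range (ls.length - 1)).any fun j =>
    decide (ls.getD j 0 ≥ 3) && decide (ls.getD (j+1) 0 ≥ 3)

lemma bcheck_map_snd (runs : List (Char × Int)) :
    ((List.range (runs.length - 1)).any fun j =>
      decide (3 ≤ (runs[j]?.getD (' ', 0)).2) && decide (3 ≤ (runs[j+1]?.getD (' ', 0)).2))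
    = bcheckI (runs.map Prod.snd) := by
  have hget : ∀ k : Nat, (runs[k]?.getD (' ', 0)).2 = (Option.map Prod.snd runs[k]?).getD 0 := by
    intro k; cases runs[k]? <;> rfl
  simp [bcheckI, List.getD_eq_getElem?_getD, List.getElem?_map, List.length_map, hget]

-- under the first two conjuncts, the cross inequality x ≠ v can be read off z ≠ v
lemma cross_beq (x y z v : Char) (w : Bool) :
    (((x == y && y == z) && w) && !(x == v)) = (((x == y && y == z) && w) && !(z == v)) := by
  by_cases h1 : x = y
  · by_cases h2 : y = z
    · subst h1; subst h2; rfl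
    · have hb : (y == z) = false := by simp [h2]
      rw [hb]; simp
  · have hb : (x == y) = false := by simp [h1]
    rw [hb]; simp

-- ===== VERDICT (by name: the statement is the Claim_ definition above) =====
theorem check_consecutive_triples_py_spec : Claim_equal_check_consecutive_triples_py := by
  unfold Claim_equal_check_consecutive_triples_py
  intro digits _
  unfold Spec_check_consecutive_triples_py
  rw [← @String.ofList_toList digits]
  generalize digits.toList = l
  by_cases hl : l.length = 8
  case neg =>
    have h8 : ((l.length : Int) = 8) = False := by
      simp only [eq_iff_iff, iff_false]; exact_mod_cast hl
    simp [check_consecutive_triples_py, check_consecutive_triples_py_alt, pysem, h8]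
  case pos =>
    rcases l with _ | ⟨a, _ | ⟨b, _ | ⟨c, _ | ⟨d, _ | ⟨e, _ | ⟨f, _ | ⟨g, _ | ⟨h, _ | ⟨x, t⟩⟩⟩⟩⟩⟩⟩⟩⟩ <;>
      simp_all
    -- now l = [a,b,c,d,e,f,g,h]
    have hr : PySem.List.pyRange 0 3 1 = [0,1,2] := by decide
    have hlen : PySem.Str.len (String.ofList [a,b,c,d,e,f,g,h]) = 8 := by simp [pysem]
    have hBfold : List.foldl altPush [] [a,b,c,d,e,f,g,h] = rleAux a 1 [b,c,d,e,f,g,h] := by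
      have := foldl_altPush [b,c,d,e,f,g,h] [] a 1
      simpa [altPush] using this
    have g0 : PySem.List.pyGet? [a,b,c,d,e,f,g,h] 0 = some a := by simp [PySem.List.pyGet?, PySem.List.pyIdx?]
    have g1 : PySem.List.pyGet? [a,b,c,d,e,f,g,h] 1 = some b := by simp [PySem.List.pyGet?, PySem.List.pyIdx?]
    have g2 : PySem.List.pyGet? [a,b,c,d,e,f,g,h] 2 = some c := by simp [PySem.List.pyGet?, PySem.List.pyIdx?]
    have g3 : PySem.List.pyGet? [a,b,c,d,e,f,g,h] 3 = some d := by simp [PySem.List.pyGet?, PySem.List.pyIdx?]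
    have g4 : PySem.List.pyGet? [a,b,c,d,e,f,g,h] 4 = some e := by simp [PySem.List.pyGet?, PySem.List.pyIdx?]
    have g5 : PySem.List.pyGet? [a,b,c,d,e,f,g,h] 5 = some f := by simp [PySem.List.pyGet?, PySem.List.pyIdx?]
    have g6 : PySem.List.pyGet? [a,b,c,d,e,f,g,h] 6 = some g := by simp [PySem.List.pyGet?, PySem.List.pyIdx?]
    have g7 : PySem.List.pyGet? [a,b,c,d,e,f,g,h] 7 = some h := by simp [PySem.List.pyGet?, PySem.List.pyIdx?]
    simp only [check_consecutive_triples_py, check_consecutive_triples_py_alt, hlen, hr,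
      PySem.Str.pyGet?, String.toList_ofList, hBfold, List.any_cons, List.any_nil]
    norm_num [g0, g1, g2, g3, g4, g5, g6, g7]
    rw [bcheck_map_snd, map_snd_rleAux]
    simp only [pat]
    simp only [show ((2:Int).toNat) = 2 from rfl, show ((3:Int).toNat) = 3 from rfl,
      show ((4:Int).toNat) = 4 from rfl, show ((5:Int).toNat) = 5 from rfl,
      show ((6:Int).toNat) = 6 from rfl, show ((7:Int).toNat) = 7 from rfl]
    simp only [List.getElem_cons_zero, List.getElem_cons_succ, bne, Option.some_beq_some]
    rw [cross_beq a b c d, cross_beq b c d e, cross_beq c d e f]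
    generalize (a == b) = b1
    generalize (b == c) = b2
    generalize (c == d) = b3
    generalize (d == e) = b4
    generalize (e == f) = b5
    generalize (f == g) = b6
    generalize (g == h) = b7
    revert b1 b2 b3 b4 b5 b6 b7
    decide
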